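-- pv_equiv track=rewrite | github.com/RadOctocode/mtg_land_calculator | main.py | remove_sideboards
-- ===== SOURCE A (Python) =====
-- def remove_sideboards(line_list):
--     """
--         takes a list of lines
--         returns a stripped list of lines without sideboards
--     """
--     return_value = []
--     for line in line_list:
--         stripped_line = line.strip()
--         if stripped_line == "Maybeboard" or stripped_line == "Sideboard" or stripped_line == "":
--             return return_value
--         return_value.append(line.strip())
--
--     return return_value
-- ===== SOURCE B (Python) =====
-- def remove_sideboards(line_list):
--     """
--         takes a list of lines
--         returns a stripped list of lines without sideboards
--     """
--     idx = next((i for i, line in enumerate(line_list)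
--                 if line.strip() in ("Maybeboard", "Sideboard", "")),
--                len(line_list))
--     return [line.strip() for line in line_list[:idx]]
-- ===== Notes on version B (the rewrite author's own statement) =====
-- stated objective: idiomatic
-- what changed: Replaced the interleaved test-and-append loop with early return by a boundary search (next over enumerate, defaulting to len) followed by a separate strip-mapping comprehension over the slice up to that boundary.
import Mathlib
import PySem

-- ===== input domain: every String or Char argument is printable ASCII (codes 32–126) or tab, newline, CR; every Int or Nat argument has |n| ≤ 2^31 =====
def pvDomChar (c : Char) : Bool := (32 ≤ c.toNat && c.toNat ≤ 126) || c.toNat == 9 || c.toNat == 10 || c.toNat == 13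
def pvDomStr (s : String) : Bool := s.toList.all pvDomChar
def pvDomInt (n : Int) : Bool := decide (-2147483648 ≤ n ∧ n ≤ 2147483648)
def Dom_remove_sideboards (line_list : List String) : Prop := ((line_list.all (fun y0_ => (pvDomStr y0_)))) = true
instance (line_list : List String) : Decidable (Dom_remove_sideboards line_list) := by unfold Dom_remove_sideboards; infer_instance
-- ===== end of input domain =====

-- B replaces A's interleaved test-and-append loop with a boundary search plus a strip-map over the prefix (idiomatic decomposition, same cost).


-- ===== PORT A =====
-- A's loop with early return 'return return_value', as structural recursion over the lines.
def remove_sideboards (line_list : List String) : List String :=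
  match line_list with
  | [] => []
  | line :: rest =>
    -- stripped_line = line.strip(), inlined
    if PySem.Str.strip line = "Maybeboard" ∨ PySem.Str.strip line = "Sideboard" ∨ PySem.Str.strip line = "" then
      []
    else
      PySem.Str.strip line :: remove_sideboards rest

-- ===== PORT B =====
-- the sentinel test 'line.strip() in ("Maybeboard", "Sideboard", "")'
def sentinelB (line : String) : Bool :=
  let s := PySem.Str.strip line
  s = "Maybeboard" || s = "Sideboard" || s = ""

-- next((i for i, line in enumerate(line_list) if sentinel), len(line_list)) → findIdx? with default
def remove_sideboards_alt (line_list : List String) : List String :=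
  let idx := (line_list.findIdx? sentinelB).getD line_list.length
  (line_list.take idx).map PySem.Str.strip

-- ===== PRECONDITION & SPEC =====
def Spec_remove_sideboards (line_list : List String) (out : List String) : Prop := out = remove_sideboards_alt line_list
instance (line_list : List String) (out : List String) : Decidable (Spec_remove_sideboards line_list out) := by unfold Spec_remove_sideboards; infer_instance

-- ===== CLAIM (what is proved, stated in full; the proofs are below) =====
def Claim_equal_remove_sideboards : Prop := ∀ (line_list : List String), Dom_remove_sideboards line_list → Spec_remove_sideboards line_list (remove_sideboards line_list)

-- ===== LEMMAS AND PROOFS =====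
theorem alt_cons_sentinel (l : String) (ls : List String) (h : sentinelB l = true) :
    remove_sideboards_alt (l :: ls) = [] := by
  simp [remove_sideboards_alt, List.findIdx?_cons, h]

theorem alt_cons_not_sentinel (l : String) (ls : List String) (h : sentinelB l = false) :
    remove_sideboards_alt (l :: ls) = PySem.Str.strip l :: remove_sideboards_alt ls := by
  unfold remove_sideboards_alt
  rw [List.findIdx?_cons, h]
  cases hfi : List.findIdx? sentinelB ls with
  | none => simp
  | some i =>
    have : i < ls.length := (List.findIdx?_eq_some_iff_findIdx_eq.mp hfi).1
    simp [List.take_succ_cons]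

theorem remove_sideboards_eq_alt (line_list : List String) :
    remove_sideboards line_list = remove_sideboards_alt line_list := by
  induction line_list with
  | nil => rfl
  | cons l ls ih =>
    by_cases h : sentinelB l = true
    · rw [alt_cons_sentinel l ls h]
      unfold remove_sideboards
      simp only [sentinelB, Bool.or_eq_true, decide_eq_true_eq] at h
      split_ifs with hc
      · rfl
      · exact absurd (or_assoc.mp h) hc
    · rw [alt_cons_not_sentinel l ls (by simpa using h)]
      unfold remove_sideboards
      simp only [sentinelB, Bool.or_eq_true, decide_eq_true_eq] at h
      push Not at h
      simp [h, ih]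

-- ===== VERDICT (by name: the statement is the Claim_ definition above) =====
theorem remove_sideboards_spec : Claim_equal_remove_sideboards := by
  intro line_list _
  exact remove_sideboards_eq_alt line_list
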